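-- pv_equiv track=rewrite | github.com/jwallace0413/Makerfest | career_app.py | predict_rules
-- ===== SOURCE A (Python) =====
-- CAREERS = ["Engineer", "Doctor", "Artist"]
--
-- def predict_rules(interest, style, enjoy, values):
--     scores = {c: 0 for c in CAREERS}
--     if interest in ["Math/Physics", "Computers/Data"]:
--         scores["Engineer"] += 2
--     if interest == "Biology/Health":
--         scores["Doctor"] += 2
--     if interest == "Art/Design":
--         scores["Artist"] += 2
--
--     if style in ["Analytical", "Hands-on"]:
--         scores["Engineer"] += 1
--     if style == "Helping People":
--         scores["Doctor"] += 1
--     if style == "Creative":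
--         scores["Artist"] += 1
--
--     for e in enjoy:
--         if e in ["Building things", "Fixing machines", "Solving puzzles"]:
--             scores["Engineer"] += 1
--         if e in ["Experiments", "Talking to people"]:
--             scores["Doctor"] += 1
--         if e == "Drawing/creating":
--             scores["Artist"] += 1
--
--     if values == "Innovation":
--         scores["Engineer"] += 1
--     if values == "Helping others":
--         scores["Doctor"] += 1
--     if values == "Creativity":
--         scores["Artist"] += 1
--     if values == "Precision/Accuracy":
--         scores["Engineer"] += 1
--         scores["Doctor"] += 1
--
--     best = max(scores, key=scores.get)
--     return best, scores
-- ===== SOURCE B (Python) =====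
-- CAREERS = ["Engineer", "Doctor", "Artist"]
--
-- def _engineer(interest, style, enjoy, values):
--     return (2 * (interest in ("Math/Physics", "Computers/Data"))
--             + (style in ("Analytical", "Hands-on"))
--             + sum(e in ("Building things", "Fixing machines", "Solving puzzles") for e in enjoy)
--             + (values in ("Innovation", "Precision/Accuracy")))
--
-- def _doctor(interest, style, enjoy, values):
--     return (2 * (interest == "Biology/Health")
--             + (style == "Helping People")
--             + sum(e in ("Experiments", "Talking to people") for e in enjoy)
--             + (values in ("Helping others", "Precision/Accuracy")))
--
-- def _artist(interest, style, enjoy, values):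
--     return (2 * (interest == "Art/Design")
--             + (style == "Creative")
--             + sum(e == "Drawing/creating" for e in enjoy)
--             + (values == "Creativity"))
--
-- def predict_rules(interest, style, enjoy, values):
--     scores = {c: f(interest, style, enjoy, values)
--               for c, f in zip(CAREERS, (_engineer, _doctor, _artist))}
--     best = max(scores, key=scores.get)
--     return best, scores
-- ===== Notes on version B (the rewrite author's own statement) =====
-- stated objective: alternative
-- what changed: Transposes the computation: instead of A's single pass that routes each answer through if-blocks mutating a shared score dict, B computes each career's score independently as a pure closed-form arithmetic expression (sum of boolean indicators, one count over enjoy per career) and assembles the dict from those three values.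
import Mathlib
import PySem

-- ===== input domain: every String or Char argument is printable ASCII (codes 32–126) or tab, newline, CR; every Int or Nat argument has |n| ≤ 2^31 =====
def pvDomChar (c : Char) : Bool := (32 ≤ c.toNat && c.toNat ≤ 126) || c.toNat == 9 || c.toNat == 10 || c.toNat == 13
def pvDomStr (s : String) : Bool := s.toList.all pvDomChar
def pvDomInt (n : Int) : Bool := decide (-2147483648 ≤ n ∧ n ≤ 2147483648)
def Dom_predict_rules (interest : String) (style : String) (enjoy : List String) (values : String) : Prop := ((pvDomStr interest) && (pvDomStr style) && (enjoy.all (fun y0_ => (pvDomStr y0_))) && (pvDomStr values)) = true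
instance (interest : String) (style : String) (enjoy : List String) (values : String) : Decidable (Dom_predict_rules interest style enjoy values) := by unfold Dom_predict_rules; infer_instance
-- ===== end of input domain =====

-- B transposes A's computation: each career's score is a pure closed-form sum of boolean
-- indicators (one count over enjoy per career) instead of A's mutate-a-shared-dict pass
-- (objective: alternative, same cost). A mutates no argument.


-- ===== PORT A =====
def pvCAREERS : List String := ["Engineer", "Doctor", "Artist"]

-- the interest if-block of A
def pvStepInterest (scores : PySem.Dict String Int) (interest : String) : PySem.Dict String Int :=
  let scores := if ["Math/Physics", "Computers/Data"].contains interest then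
      scores.modify "Engineer" 0 (· + 2) else scores
  let scores := if interest == "Biology/Health" then
      scores.modify "Doctor" 0 (· + 2) else scores
  if interest == "Art/Design" then scores.modify "Artist" 0 (· + 2) else scores

-- the style if-block of A
def pvStepStyle (scores : PySem.Dict String Int) (style : String) : PySem.Dict String Int :=
  let scores := if ["Analytical", "Hands-on"].contains style then
      scores.modify "Engineer" 0 (· + 1) else scores
  let scores := if style == "Helping People" then
      scores.modify "Doctor" 0 (· + 1) else scores
  if style == "Creative" then scores.modify "Artist" 0 (· + 1) else scores

-- the body of A's 'for e in enjoy' loop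
def pvStepEnjoy (scores : PySem.Dict String Int) (e : String) : PySem.Dict String Int :=
  let scores := if ["Building things", "Fixing machines", "Solving puzzles"].contains e then
      scores.modify "Engineer" 0 (· + 1) else scores
  let scores := if ["Experiments", "Talking to people"].contains e then
      scores.modify "Doctor" 0 (· + 1) else scores
  if e == "Drawing/creating" then scores.modify "Artist" 0 (· + 1) else scores

-- the values if-block of A
def pvStepValues (scores : PySem.Dict String Int) (values : String) : PySem.Dict String Int :=
  let scores := if values == "Innovation" then
      scores.modify "Engineer" 0 (· + 1) else scores
  let scores := if values == "Helping others" then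
      scores.modify "Doctor" 0 (· + 1) else scores
  let scores := if values == "Creativity" then
      scores.modify "Artist" 0 (· + 1) else scores
  if values == "Precision/Accuracy" then
      (scores.modify "Engineer" 0 (· + 1)).modify "Doctor" 0 (· + 1) else scores

def predict_rules (interest : String) (style : String) (enjoy : List String) (values : String) : String × (List (String × Int)) :=
  let scores : PySem.Dict String Int :=
    PySem.Dict.ofList (pvCAREERS.map (fun c => (c, (0 : Int))))
  let scores := pvStepInterest scores interest
  let scores := pvStepStyle scores style
  let scores := enjoy.foldl pvStepEnjoy scores
  let scores := pvStepValues scores values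
  -- max(scores, key=scores.get): first key with maximal value; the dict is never empty,
  -- so the none branch of max? is unreachable
  match PySem.List.max? scores.keys (fun k => scores.getD k 0) with
  | some best => (best, scores.items)
  | none => ("", scores.items)

-- ===== PORT B =====
-- _engineer: pure closed-form score (2*indicator + indicator + count over enjoy + indicator)
def pvEngineer (interest : String) (style : String) (enjoy : List String) (values : String) : Int :=
  2 * (if ["Math/Physics", "Computers/Data"].contains interest then 1 else 0)
  + (if ["Analytical", "Hands-on"].contains style then 1 else 0)
  + (enjoy.map (fun e => if ["Building things", "Fixing machines", "Solving puzzles"].contains e then (1 : Int) else 0)).sum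
  + (if ["Innovation", "Precision/Accuracy"].contains values then 1 else 0)

def pvDoctor (interest : String) (style : String) (enjoy : List String) (values : String) : Int :=
  2 * (if interest == "Biology/Health" then 1 else 0)
  + (if style == "Helping People" then 1 else 0)
  + (enjoy.map (fun e => if ["Experiments", "Talking to people"].contains e then (1 : Int) else 0)).sum
  + (if ["Helping others", "Precision/Accuracy"].contains values then 1 else 0)

def pvArtist (interest : String) (style : String) (enjoy : List String) (values : String) : Int :=
  2 * (if interest == "Art/Design" then 1 else 0)
  + (if style == "Creative" then 1 else 0)
  + (enjoy.map (fun e => if e == "Drawing/creating" then (1 : Int) else 0)).sum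
  + (if values == "Creativity" then 1 else 0)

def predict_rules_alt (interest : String) (style : String) (enjoy : List String) (values : String) : String × (List (String × Int)) :=
  -- {c: f(...) for c, f in zip(CAREERS, (_engineer, _doctor, _artist))}
  let scores : PySem.Dict String Int :=
    PySem.Dict.ofList (List.zip pvCAREERS
      [pvEngineer interest style enjoy values,
       pvDoctor interest style enjoy values,
       pvArtist interest style enjoy values])
  match PySem.List.max? scores.keys (fun k => scores.getD k 0) with
  | some best => (best, scores.items)
  | none => ("", scores.items)

-- ===== PRECONDITION & SPEC =====
def Spec_predict_rules (interest : String) (style : String) (enjoy : List String) (values : String) (out : String × (List (String × Int))) : Prop := out = predict_rules_alt interest style enjoy values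
instance (interest : String) (style : String) (enjoy : List String) (values : String) (out : String × (List (String × Int))) : Decidable (Spec_predict_rules interest style enjoy values out) := by unfold Spec_predict_rules; infer_instance

-- ===== CLAIM =====
def Claim_equal_predict_rules : Prop := ∀ (interest : String) (style : String) (enjoy : List String) (values : String), Dom_predict_rules interest style enjoy values → Spec_predict_rules interest style enjoy values (predict_rules interest style enjoy values)

-- ===== LEMMAS AND PROOFS =====

-- the only dict shape the algorithm ever holds: the three careers in order
def pvMk3 (x y z : Int) : PySem.Dict String Int :=
  PySem.Dict.mk [("Engineer", x), ("Doctor", y), ("Artist", z)]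

theorem pv_ofList3 (a b c : Int) :
    PySem.Dict.ofList (List.zip pvCAREERS [a, b, c]) = pvMk3 a b c := by
  apply PySem.Dict.ext
  simp [pvCAREERS, pvMk3, PySem.Dict.ofList, PySem.Dict.update, PySem.Dict.insert,
    PySem.Dict.contains, PySem.Dict.empty]

theorem pv_init3 :
    PySem.Dict.ofList (pvCAREERS.map (fun c => (c, (0 : Int)))) = pvMk3 0 0 0 := by decide

theorem pv_step_interest (x y z : Int) (i : String) :
    pvStepInterest (pvMk3 x y z) i =
      pvMk3 (x + 2 * (if ["Math/Physics", "Computers/Data"].contains i then 1 else 0))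
            (y + 2 * (if i == "Biology/Health" then 1 else 0))
            (z + 2 * (if i == "Art/Design" then 1 else 0)) := by
  by_cases h0 : i = "Math/Physics"
  · subst h0; apply PySem.Dict.ext <;> simp [pvStepInterest, pvStepStyle, pvStepEnjoy, pvStepValues, pvMk3, PySem.Dict.modify, PySem.Dict.getD, PySem.Dict.get?, PySem.Dict.insert, PySem.Dict.contains]
  by_cases h1 : i = "Computers/Data"
  · subst h1; apply PySem.Dict.ext <;> simp [pvStepInterest, pvStepStyle, pvStepEnjoy, pvStepValues, pvMk3, PySem.Dict.modify, PySem.Dict.getD, PySem.Dict.get?, PySem.Dict.insert, PySem.Dict.contains]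
  by_cases h2 : i = "Biology/Health"
  · subst h2; apply PySem.Dict.ext <;> simp [pvStepInterest, pvStepStyle, pvStepEnjoy, pvStepValues, pvMk3, PySem.Dict.modify, PySem.Dict.getD, PySem.Dict.get?, PySem.Dict.insert, PySem.Dict.contains]
  by_cases h3 : i = "Art/Design"
  · subst h3; apply PySem.Dict.ext <;> simp [pvStepInterest, pvStepStyle, pvStepEnjoy, pvStepValues, pvMk3, PySem.Dict.modify, PySem.Dict.getD, PySem.Dict.get?, PySem.Dict.insert, PySem.Dict.contains]
  · have b0 : ("Math/Physics" == i) = false := beq_eq_false_iff_ne.mpr (fun he => h0 he.symm)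
    have c0 : (i == "Math/Physics") = false := beq_eq_false_iff_ne.mpr h0
    have b1 : ("Computers/Data" == i) = false := beq_eq_false_iff_ne.mpr (fun he => h1 he.symm)
    have c1 : (i == "Computers/Data") = false := beq_eq_false_iff_ne.mpr h1
    have b2 : ("Biology/Health" == i) = false := beq_eq_false_iff_ne.mpr (fun he => h2 he.symm)
    have c2 : (i == "Biology/Health") = false := beq_eq_false_iff_ne.mpr h2
    have b3 : ("Art/Design" == i) = false := beq_eq_false_iff_ne.mpr (fun he => h3 he.symm)
    have c3 : (i == "Art/Design") = false := beq_eq_false_iff_ne.mpr h3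
    simp only [pvStepInterest, List.contains, List.elem_cons, List.elem_nil,
      b0, c0, b1, c1, b2, c2, b3, c3,
      Bool.or_self, Bool.false_eq_true, if_false, mul_zero, add_zero]

theorem pv_step_style (x y z : Int) (s : String) :
    pvStepStyle (pvMk3 x y z) s =
      pvMk3 (x + (if ["Analytical", "Hands-on"].contains s then 1 else 0))
            (y + (if s == "Helping People" then 1 else 0))
            (z + (if s == "Creative" then 1 else 0)) := by
  by_cases h0 : s = "Analytical"
  · subst h0; apply PySem.Dict.ext <;> simp [pvStepInterest, pvStepStyle, pvStepEnjoy, pvStepValues, pvMk3, PySem.Dict.modify, PySem.Dict.getD, PySem.Dict.get?, PySem.Dict.insert, PySem.Dict.contains]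
  by_cases h1 : s = "Hands-on"
  · subst h1; apply PySem.Dict.ext <;> simp [pvStepInterest, pvStepStyle, pvStepEnjoy, pvStepValues, pvMk3, PySem.Dict.modify, PySem.Dict.getD, PySem.Dict.get?, PySem.Dict.insert, PySem.Dict.contains]
  by_cases h2 : s = "Helping People"
  · subst h2; apply PySem.Dict.ext <;> simp [pvStepInterest, pvStepStyle, pvStepEnjoy, pvStepValues, pvMk3, PySem.Dict.modify, PySem.Dict.getD, PySem.Dict.get?, PySem.Dict.insert, PySem.Dict.contains]
  by_cases h3 : s = "Creative"
  · subst h3; apply PySem.Dict.ext <;> simp [pvStepInterest, pvStepStyle, pvStepEnjoy, pvStepValues, pvMk3, PySem.Dict.modify, PySem.Dict.getD, PySem.Dict.get?, PySem.Dict.insert, PySem.Dict.contains]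
  · have b0 : ("Analytical" == s) = false := beq_eq_false_iff_ne.mpr (fun he => h0 he.symm)
    have c0 : (s == "Analytical") = false := beq_eq_false_iff_ne.mpr h0
    have b1 : ("Hands-on" == s) = false := beq_eq_false_iff_ne.mpr (fun he => h1 he.symm)
    have c1 : (s == "Hands-on") = false := beq_eq_false_iff_ne.mpr h1
    have b2 : ("Helping People" == s) = false := beq_eq_false_iff_ne.mpr (fun he => h2 he.symm)
    have c2 : (s == "Helping People") = false := beq_eq_false_iff_ne.mpr h2
    have b3 : ("Creative" == s) = false := beq_eq_false_iff_ne.mpr (fun he => h3 he.symm)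
    have c3 : (s == "Creative") = false := beq_eq_false_iff_ne.mpr h3
    simp only [pvStepStyle, List.contains, List.elem_cons, List.elem_nil,
      b0, c0, b1, c1, b2, c2, b3, c3,
      Bool.or_self, Bool.false_eq_true, if_false, mul_zero, add_zero]

theorem pv_step_enjoy (x y z : Int) (e : String) :
    pvStepEnjoy (pvMk3 x y z) e =
      pvMk3 (x + (if ["Building things", "Fixing machines", "Solving puzzles"].contains e then 1 else 0))
            (y + (if ["Experiments", "Talking to people"].contains e then 1 else 0))
            (z + (if e == "Drawing/creating" then 1 else 0)) := by
  by_cases h0 : e = "Building things"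
  · subst h0; apply PySem.Dict.ext <;> simp [pvStepInterest, pvStepStyle, pvStepEnjoy, pvStepValues, pvMk3, PySem.Dict.modify, PySem.Dict.getD, PySem.Dict.get?, PySem.Dict.insert, PySem.Dict.contains]
  by_cases h1 : e = "Fixing machines"
  · subst h1; apply PySem.Dict.ext <;> simp [pvStepInterest, pvStepStyle, pvStepEnjoy, pvStepValues, pvMk3, PySem.Dict.modify, PySem.Dict.getD, PySem.Dict.get?, PySem.Dict.insert, PySem.Dict.contains]
  by_cases h2 : e = "Solving puzzles"
  · subst h2; apply PySem.Dict.ext <;> simp [pvStepInterest, pvStepStyle, pvStepEnjoy, pvStepValues, pvMk3, PySem.Dict.modify, PySem.Dict.getD, PySem.Dict.get?, PySem.Dict.insert, PySem.Dict.contains]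
  by_cases h3 : e = "Experiments"
  · subst h3; apply PySem.Dict.ext <;> simp [pvStepInterest, pvStepStyle, pvStepEnjoy, pvStepValues, pvMk3, PySem.Dict.modify, PySem.Dict.getD, PySem.Dict.get?, PySem.Dict.insert, PySem.Dict.contains]
  by_cases h4 : e = "Talking to people"
  · subst h4; apply PySem.Dict.ext <;> simp [pvStepInterest, pvStepStyle, pvStepEnjoy, pvStepValues, pvMk3, PySem.Dict.modify, PySem.Dict.getD, PySem.Dict.get?, PySem.Dict.insert, PySem.Dict.contains]
  by_cases h5 : e = "Drawing/creating"
  · subst h5; apply PySem.Dict.ext <;> simp [pvStepInterest, pvStepStyle, pvStepEnjoy, pvStepValues, pvMk3, PySem.Dict.modify, PySem.Dict.getD, PySem.Dict.get?, PySem.Dict.insert, PySem.Dict.contains]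
  · have b0 : ("Building things" == e) = false := beq_eq_false_iff_ne.mpr (fun he => h0 he.symm)
    have c0 : (e == "Building things") = false := beq_eq_false_iff_ne.mpr h0
    have b1 : ("Fixing machines" == e) = false := beq_eq_false_iff_ne.mpr (fun he => h1 he.symm)
    have c1 : (e == "Fixing machines") = false := beq_eq_false_iff_ne.mpr h1
    have b2 : ("Solving puzzles" == e) = false := beq_eq_false_iff_ne.mpr (fun he => h2 he.symm)
    have c2 : (e == "Solving puzzles") = false := beq_eq_false_iff_ne.mpr h2
    have b3 : ("Experiments" == e) = false := beq_eq_false_iff_ne.mpr (fun he => h3 he.symm)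
    have c3 : (e == "Experiments") = false := beq_eq_false_iff_ne.mpr h3
    have b4 : ("Talking to people" == e) = false := beq_eq_false_iff_ne.mpr (fun he => h4 he.symm)
    have c4 : (e == "Talking to people") = false := beq_eq_false_iff_ne.mpr h4
    have b5 : ("Drawing/creating" == e) = false := beq_eq_false_iff_ne.mpr (fun he => h5 he.symm)
    have c5 : (e == "Drawing/creating") = false := beq_eq_false_iff_ne.mpr h5
    simp only [pvStepEnjoy, List.contains, List.elem_cons, List.elem_nil,
      b0, c0, b1, c1, b2, c2, b3, c3, b4, c4, b5, c5,
      Bool.or_self, Bool.false_eq_true, if_false, mul_zero, add_zero]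

theorem pv_step_values (x y z : Int) (v : String) :
    pvStepValues (pvMk3 x y z) v =
      pvMk3 (x + (if ["Innovation", "Precision/Accuracy"].contains v then 1 else 0))
            (y + (if ["Helping others", "Precision/Accuracy"].contains v then 1 else 0))
            (z + (if v == "Creativity" then 1 else 0)) := by
  by_cases h0 : v = "Innovation"
  · subst h0; apply PySem.Dict.ext <;> simp [pvStepInterest, pvStepStyle, pvStepEnjoy, pvStepValues, pvMk3, PySem.Dict.modify, PySem.Dict.getD, PySem.Dict.get?, PySem.Dict.insert, PySem.Dict.contains]
  by_cases h1 : v = "Helping others"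
  · subst h1; apply PySem.Dict.ext <;> simp [pvStepInterest, pvStepStyle, pvStepEnjoy, pvStepValues, pvMk3, PySem.Dict.modify, PySem.Dict.getD, PySem.Dict.get?, PySem.Dict.insert, PySem.Dict.contains]
  by_cases h2 : v = "Creativity"
  · subst h2; apply PySem.Dict.ext <;> simp [pvStepInterest, pvStepStyle, pvStepEnjoy, pvStepValues, pvMk3, PySem.Dict.modify, PySem.Dict.getD, PySem.Dict.get?, PySem.Dict.insert, PySem.Dict.contains]
  by_cases h3 : v = "Precision/Accuracy"
  · subst h3; apply PySem.Dict.ext <;> simp [pvStepInterest, pvStepStyle, pvStepEnjoy, pvStepValues, pvMk3, PySem.Dict.modify, PySem.Dict.getD, PySem.Dict.get?, PySem.Dict.insert, PySem.Dict.contains]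
  · have b0 : ("Innovation" == v) = false := beq_eq_false_iff_ne.mpr (fun he => h0 he.symm)
    have c0 : (v == "Innovation") = false := beq_eq_false_iff_ne.mpr h0
    have b1 : ("Helping others" == v) = false := beq_eq_false_iff_ne.mpr (fun he => h1 he.symm)
    have c1 : (v == "Helping others") = false := beq_eq_false_iff_ne.mpr h1
    have b2 : ("Creativity" == v) = false := beq_eq_false_iff_ne.mpr (fun he => h2 he.symm)
    have c2 : (v == "Creativity") = false := beq_eq_false_iff_ne.mpr h2
    have b3 : ("Precision/Accuracy" == v) = false := beq_eq_false_iff_ne.mpr (fun he => h3 he.symm)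
    have c3 : (v == "Precision/Accuracy") = false := beq_eq_false_iff_ne.mpr h3
    simp only [pvStepValues, List.contains, List.elem_cons, List.elem_nil,
      b0, c0, b1, c1, b2, c2, b3, c3,
      Bool.or_self, Bool.false_eq_true, if_false, mul_zero, add_zero]

-- the enjoy loop of A equals three independent indicator sums
theorem pv_fold_enjoy (es : List String) (x y z : Int) :
    es.foldl pvStepEnjoy (pvMk3 x y z) =
      pvMk3 (x + (es.map (fun e => if ["Building things", "Fixing machines", "Solving puzzles"].contains e then (1 : Int) else 0)).sum)
            (y + (es.map (fun e => if ["Experiments", "Talking to people"].contains e then (1 : Int) else 0)).sum)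
            (z + (es.map (fun e => if e == "Drawing/creating" then (1 : Int) else 0)).sum) := by
  induction es generalizing x y z with
  | nil => simp [pvMk3]
  | cons e es ih =>
    simp only [List.foldl_cons, pv_step_enjoy, ih, List.map_cons, List.sum_cons, add_assoc]

-- ===== VERDICT =====
theorem predict_rules_spec : Claim_equal_predict_rules := by
  intro interest style enjoy values _
  show predict_rules interest style enjoy values = predict_rules_alt interest style enjoy values
  simp only [predict_rules, predict_rules_alt, pv_init3, pv_step_interest, pv_step_style,
    pv_fold_enjoy, pv_step_values, pv_ofList3, pvEngineer, pvDoctor, pvArtist, zero_add]
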